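-- pv_equiv track=rewrite | github.com/yshui/picom | bin/compton-convgen.py | mmirror4
-- ===== SOURCE A (Python) =====
-- def mmirror4(matrix):
--     """Do a 4-way mirroring on a matrix from top-left corner."""
--     width = len(matrix[0])
--     height = len(matrix)
--     for i in range(height):
--         for j in range(width):
--             x = min(i, height - 1 - i)
--             y = min(j, width - 1 - j)
--             matrix[i][j] = matrix[x][y]
--     return matrix
-- ===== SOURCE B (Python) =====
-- def mmirror4(matrix):
--     """Do a 4-way mirroring on a matrix from top-left corner."""
--     height = len(matrix)
--     width = len(matrix[0])
--     for i in range((height + 1) // 2):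
--         for j in range((width + 1) // 2):
--             v = matrix[i][j]
--             matrix[i][width - 1 - j] = v
--             matrix[height - 1 - i][j] = v
--             matrix[height - 1 - i][width - 1 - j] = v
--     return matrix
-- ===== Notes on version B (the rewrite author's own statement) =====
-- stated objective: faster
-- what changed: B scatters each top-left-quadrant value to its four mirror positions, iterating only over the ceil-half quadrant, instead of A's gather that visits every cell and pulls via min(i,h-1-i),min(j,w-1-j).
-- outside the precondition, e.g. on mmirror4([[1, 2], [3]]): A raises IndexError, B raises IndexError
import Mathlib
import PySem

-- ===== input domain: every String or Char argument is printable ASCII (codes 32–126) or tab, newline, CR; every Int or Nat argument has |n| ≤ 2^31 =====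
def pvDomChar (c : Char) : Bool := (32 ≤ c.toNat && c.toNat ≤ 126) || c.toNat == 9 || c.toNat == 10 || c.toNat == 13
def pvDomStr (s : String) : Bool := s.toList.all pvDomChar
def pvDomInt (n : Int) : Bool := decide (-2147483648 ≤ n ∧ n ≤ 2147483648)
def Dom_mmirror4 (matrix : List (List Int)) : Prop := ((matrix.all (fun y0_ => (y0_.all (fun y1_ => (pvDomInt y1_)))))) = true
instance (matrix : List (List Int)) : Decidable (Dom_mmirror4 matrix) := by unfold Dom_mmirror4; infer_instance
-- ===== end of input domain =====

-- B mirrors by scattering each top-left-quadrant value to its four mirror cells instead of A's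
-- per-cell gather via min(); both Pythons mutate the argument in place — the equivalence proved
-- here is about the return value.


-- ===== PORT A =====
-- shared in-place-matrix primitives: matrix[a][b] read / write for 0 ≤ indices (always in
-- range under Pre_, so the getD/set out-of-range defaults are never hit on admitted inputs)
def get2 (m : List (List Int)) (a b : Nat) : Int := (m.getD a []).getD b 0
def set2 (m : List (List Int)) (a b : Nat) (v : Int) : List (List Int) :=
  m.set a ((m.getD a []).set b v)

-- literal transliteration of A: for i in range(height): for j in range(width):
--   matrix[i][j] = matrix[min(i,h-1-i)][min(j,w-1-j)]  (reads the CURRENT matrix, as Python does)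
def mmirror4 (matrix : List (List Int)) : List (List Int) :=
  let width := (matrix.headD []).length
  let height := matrix.length
  (List.range height).foldl (fun m i =>
    (List.range width).foldl (fun m j =>
      set2 m i j (get2 m (min i (height - 1 - i)) (min j (width - 1 - j)))) m) matrix

-- ===== PORT B =====
-- literal transliteration of B: iterate the ceil-half quadrant and scatter v = matrix[i][j]
-- to the three mirrored positions
def mmirror4_alt (matrix : List (List Int)) : List (List Int) :=
  let height := matrix.length
  let width := (matrix.headD []).length
  (List.range ((height + 1) / 2)).foldl (fun m i =>
    (List.range ((width + 1) / 2)).foldl (fun m j =>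
      let v := get2 m i j
      let m := set2 m i (width - 1 - j) v
      let m := set2 m (height - 1 - i) j v
      set2 m (height - 1 - i) (width - 1 - j) v) m) matrix

-- ===== PRECONDITION & SPEC =====
-- Pre_ excludes exactly the inputs on which the Pythons raise IndexError: the empty matrix
-- (matrix[0]) and ragged matrices with some row shorter than row 0 (out-of-range access).
def Pre_mmirror4 (matrix : List (List Int)) : Prop :=
  matrix ≠ [] ∧ ∀ row ∈ matrix, (matrix.headD []).length ≤ row.length
instance (matrix : List (List Int)) : Decidable (Pre_mmirror4 matrix) := by unfold Pre_mmirror4; infer_instance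
def pvWitness_mmirror4 : List (List Int) := [[1, 2], [3, 4]]

def Spec_mmirror4 (matrix : List (List Int)) (out : List (List Int)) : Prop := out = mmirror4_alt matrix
instance (matrix : List (List Int)) (out : List (List Int)) : Decidable (Spec_mmirror4 matrix out) := by unfold Spec_mmirror4; infer_instance

-- ===== CLAIM (what is proved, stated in full; the proofs are below) =====
def Claim_equal_mmirror4 : Prop := ∀ (matrix : List (List Int)), Dom_mmirror4 matrix → Pre_mmirror4 matrix → Spec_mmirror4 matrix (mmirror4 matrix)

-- ===== LEMMAS AND PROOFS =====

-- the value every cell (a,b), b < w, of the mirrored matrix ends as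
def Aval (m0 : List (List Int)) (h w a b : Nat) : Int :=
  get2 m0 (min a (h - 1 - a)) (min b (w - 1 - b))

-- shape equality (all lengths agree)
def ShapeEq (m0 m : List (List Int)) : Prop :=
  m.length = m0.length ∧ ∀ r, (m.getD r []).length = (m0.getD r []).length

theorem shapeEq_refl (m0 : List (List Int)) : ShapeEq m0 m0 := ⟨rfl, fun _ => rfl⟩

theorem getD2_set2 (m : List (List Int)) (a b r : Nat) (v : Int) :
    (set2 m a b v).getD r [] =
      if a = r ∧ a < m.length then (m.getD a []).set b v else m.getD r [] := by
  simp only [set2, List.getD_eq_getElem?_getD, List.getElem?_set]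
  by_cases h1 : a = r
  · subst h1
    by_cases h2 : a < m.length
    · simp [h2]
    · simp [h2]
  · simp [h1]

theorem shapeEq_set2 (m0 m : List (List Int)) (a b : Nat) (v : Int)
    (hs : ShapeEq m0 m) : ShapeEq m0 (set2 m a b v) := by
  obtain ⟨h1, h2⟩ := hs
  refine ⟨by simpa [set2] using h1, fun r => ?_⟩
  rw [getD2_set2]
  split_ifs with hc
  · obtain ⟨rfl, -⟩ := hc
    simpa using h2 a
  · exact h2 r

theorem get2_set2 (m : List (List Int)) (a b c d : Nat) (v : Int) :
    get2 (set2 m a b v) c d =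
      if a = c ∧ b = d ∧ a < m.length ∧ b < (m.getD a []).length then v
      else get2 m c d := by
  unfold get2
  rw [getD2_set2]
  by_cases h1 : a = c ∧ a < m.length
  · rw [if_pos h1]
    obtain ⟨rfl, hlen⟩ := h1
    rw [List.getD_eq_getElem?_getD (l := (m.getD a []).set b v), List.getElem?_set]
    by_cases h2 : b = d
    · subst h2
      by_cases h3 : b < (m.getD a []).length
      · rw [if_pos rfl, if_pos h3, Option.getD_some, if_pos ⟨rfl, rfl, hlen, h3⟩]
      · rw [if_pos rfl, if_neg h3, Option.getD_none, if_neg (by tauto),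
           List.getD_eq_getElem?_getD (l := m.getD a []),
           List.getElem?_eq_none (by omega : (m.getD a []).length ≤ b), Option.getD_none]
    · rw [if_neg h2, if_neg (by tauto), List.getD_eq_getElem?_getD (l := m.getD a [])]
  · rw [if_neg (by tauto), if_neg (by tauto)]

-- foldl over List.range with an invariant
theorem foldl_range_inv {α : Type} (f : α → Nat → α) (P : Nat → α → Prop) :
    ∀ (n : Nat) (a : α), P 0 a → (∀ i b, i < n → P i b → P (i + 1) (f b i)) →
      P n ((List.range n).foldl f a) := by
  intro n
  induction n with
  | zero => intro a h0 _; simpa using h0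
  | succ k ih =>
      intro a h0 hs
      rw [List.range_succ, List.foldl_append]
      exact hs k _ (by omega) (ih a h0 (fun i b hi => hs i b (by omega)))

-- the mirror source map is idempotent
theorem aval_source (m0 : List (List Int)) (h w : Nat) {a b : Nat}
    (ha : a < h) (hb : b < w) :
    Aval m0 h w (min a (h - 1 - a)) (min b (w - 1 - b)) = Aval m0 h w a b := by
  unfold Aval
  rw [show min (min a (h - 1 - a)) (h - 1 - min a (h - 1 - a)) = min a (h - 1 - a) by omega,
      show min (min b (w - 1 - b)) (w - 1 - min b (w - 1 - b)) = min b (w - 1 - b) by omega]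

-- every row of m0 has length ≥ len(row 0) (from Pre_)
theorem rowlen_ge (m0 : List (List Int)) (hpre : Pre_mmirror4 m0) {r : Nat}
    (hr : r < m0.length) : (m0.headD []).length ≤ (m0.getD r []).length := by
  refine hpre.2 (m0.getD r []) ?_
  have : m0.getD r [] = m0[r] := by simp [List.getD, List.getElem?_eq_getElem hr]
  rw [this]; exact List.getElem_mem hr

-- the pointwise invariant both folds are driven through: cells whose condition C holds are
-- final (Aval), the rest still hold their original value
def MInv (m0 : List (List Int)) (h w : Nat) (C : Nat → Nat → Prop)
    [inst : ∀ a b, Decidable (C a b)] (m : List (List Int)) : Prop :=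
  ShapeEq m0 m ∧
    ∀ a b, get2 m a b =
      if a < h ∧ b < w ∧ C a b then Aval m0 h w a b else get2 m0 a b

-- A's fold computes the mirrored matrix pointwise
theorem A_fold (m0 : List (List Int)) (hpre : Pre_mmirror4 m0) (h w : Nat)
    (hh : h = m0.length) (hw : w = (m0.headD []).length) :
    MInv m0 h w (fun _ _ => True) ((List.range h).foldl (fun m i =>
      (List.range w).foldl (fun m j =>
        set2 m i j (get2 m (min i (h - 1 - i)) (min j (w - 1 - j)))) m) m0) := by
  have hW : ∀ r, r < h → w ≤ (m0.getD r []).length := fun r hr =>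
    hw ▸ rowlen_ge m0 hpre (hh ▸ hr)
  have main : MInv m0 h w (fun a _ => a < h) ((List.range h).foldl (fun m i =>
      (List.range w).foldl (fun m j =>
        set2 m i j (get2 m (min i (h - 1 - i)) (min j (w - 1 - j)))) m) m0) := by
    apply foldl_range_inv _ (fun k m => MInv m0 h w (fun a _ => a < k) m)
    · refine ⟨shapeEq_refl m0, fun a b => ?_⟩
      rw [if_neg (by omega)]
    · intro i m hi hP
      have inner : MInv m0 h w (fun a b => a < i ∨ (a = i ∧ b < w))
          ((List.range w).foldl (fun m j =>
            set2 m i j (get2 m (min i (h - 1 - i)) (min j (w - 1 - j)))) m) := by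
        apply foldl_range_inv _
          (fun t m => MInv m0 h w (fun a b => a < i ∨ (a = i ∧ b < t)) m)
        · obtain ⟨hs, hv⟩ := hP
          refine ⟨hs, fun a b => ?_⟩
          rw [hv a b]; split_ifs with h1 h2 h2 <;> first | rfl | omega
        · intro j m hj hQ
          obtain ⟨hs, hv⟩ := hQ
          have hml : m.length = m0.length := hs.1
          have e3 : (m.getD i []).length = (m0.getD i []).length := hs.2 i
          have hwi : w ≤ (m0.getD i []).length := hW i hi
          have hread : get2 m (min i (h - 1 - i)) (min j (w - 1 - j)) = Aval m0 h w i j := by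
            rw [hv]
            split_ifs with hc
            · exact aval_source m0 h w hi hj
            · rfl
          refine ⟨shapeEq_set2 _ _ _ _ _ hs, fun a b => ?_⟩
          rw [get2_set2, hread]
          by_cases hab : i = a ∧ j = b
          · obtain ⟨rfl, rfl⟩ := hab
            have hcL : i = i ∧ j = j ∧ i < m.length ∧ j < (m.getD i []).length :=
              ⟨rfl, rfl, by omega, by rw [e3]; omega⟩
            have hcR : i < h ∧ j < w ∧ (i < i ∨ (i = i ∧ j < j + 1)) :=
              ⟨by omega, by omega, Or.inr ⟨rfl, by omega⟩⟩
            rw [if_pos hcL, if_pos hcR]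
          · rw [if_neg (fun hc => hab ⟨hc.1, hc.2.1⟩), hv a b]
            split_ifs with h1 h2 h2 <;> first | rfl | omega
      obtain ⟨hs, hv⟩ := inner
      refine ⟨hs, fun a b => ?_⟩
      rw [hv a b]; split_ifs with h1 h2 h2 <;> first | rfl | omega
  obtain ⟨hs, hv⟩ := main
  refine ⟨hs, fun a b => ?_⟩
  rw [hv a b]
  by_cases hc : a < h ∧ b < w
  · rw [if_pos ⟨hc.1, hc.2, by omega⟩, if_pos ⟨hc.1, hc.2, trivial⟩]
  · rw [if_neg (fun hx => hc ⟨hx.1, hx.2.1⟩), if_neg (fun hx => hc ⟨hx.1, hx.2.1⟩)]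

-- B's fold computes the same matrix pointwise
theorem B_fold (m0 : List (List Int)) (hpre : Pre_mmirror4 m0) (h w : Nat)
    (hh : h = m0.length) (hw : w = (m0.headD []).length) :
    MInv m0 h w (fun _ _ => True) ((List.range ((h + 1) / 2)).foldl (fun m i =>
      (List.range ((w + 1) / 2)).foldl (fun m j =>
        set2 (set2 (set2 m i (w - 1 - j) (get2 m i j)) (h - 1 - i) j (get2 m i j))
          (h - 1 - i) (w - 1 - j) (get2 m i j)) m) m0) := by
  have hW : ∀ r, r < h → w ≤ (m0.getD r []).length := fun r hr =>
    hw ▸ rowlen_ge m0 hpre (hh ▸ hr)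
  have main : MInv m0 h w (fun a _ => min a (h - 1 - a) < (h + 1) / 2)
      ((List.range ((h + 1) / 2)).foldl (fun m i =>
        (List.range ((w + 1) / 2)).foldl (fun m j =>
          set2 (set2 (set2 m i (w - 1 - j) (get2 m i j)) (h - 1 - i) j (get2 m i j))
            (h - 1 - i) (w - 1 - j) (get2 m i j)) m) m0) := by
    apply foldl_range_inv _ (fun k m => MInv m0 h w (fun a _ => min a (h - 1 - a) < k) m)
    · refine ⟨shapeEq_refl m0, fun a b => ?_⟩
      rw [if_neg (by omega)]
    · intro i m hi hP
      have hih : i < h := by omega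
      have hmini : min i (h - 1 - i) = i := by omega
      have inner : MInv m0 h w (fun a b => min a (h - 1 - a) < i ∨
          (min a (h - 1 - a) = i ∧ min b (w - 1 - b) < (w + 1) / 2))
          ((List.range ((w + 1) / 2)).foldl (fun m j =>
            set2 (set2 (set2 m i (w - 1 - j) (get2 m i j)) (h - 1 - i) j (get2 m i j))
              (h - 1 - i) (w - 1 - j) (get2 m i j)) m) := by
        apply foldl_range_inv _ (fun t m => MInv m0 h w (fun a b =>
          min a (h - 1 - a) < i ∨ (min a (h - 1 - a) = i ∧ min b (w - 1 - b) < t)) m)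
        · obtain ⟨hs, hv⟩ := hP
          refine ⟨hs, fun a b => ?_⟩
          rw [hv a b]; split_ifs with h1 h2 h2 <;> first | rfl | omega
        · intro j m hj hQ
          obtain ⟨hs, hv⟩ := hQ
          have hjw : j < w := by omega
          have hminj : min j (w - 1 - j) = j := by omega
          -- the source cell (i,j) maps to itself and has never been written: v = m0[i][j]
          have hread : get2 m i j = Aval m0 h w i j := by
            rw [hv]
            rw [if_neg (by omega)]
            unfold Aval
            rw [hmini, hminj]
          have hs1 := shapeEq_set2 m0 m i (w - 1 - j) (get2 m i j) hs
          have hs2 := shapeEq_set2 m0 _ (h - 1 - i) j (get2 m i j) hs1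
          have hs3 := shapeEq_set2 m0 _ (h - 1 - i) (w - 1 - j) (get2 m i j) hs2
          refine ⟨hs3, fun a b => ?_⟩
          have hml : m.length = m0.length := hs.1
          have hm1l := hs1.1
          have hm2l := hs2.1
          have e1 := hs2.2 (h - 1 - i)
          have e2 := hs1.2 (h - 1 - i)
          have e3 := hs.2 i
          have hwi : w ≤ (m0.getD i []).length := hW i hih
          have hwhi : w ≤ (m0.getD (h - 1 - i) []).length := hW _ (by omega)
          have hv' : ∀ a b, get2 m a b =
              if a < h ∧ b < w ∧ (min a (h - 1 - a) < i ∨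
                  (min a (h - 1 - a) = i ∧ min b (w - 1 - b) < j)) then Aval m0 h w a b
              else get2 m0 a b := hv
          rw [get2_set2, get2_set2, get2_set2]
          -- all four mirror positions of (i,j) carry the same final value, namely v
          have hav : ∀ a' b', min a' (h - 1 - a') = i → min b' (w - 1 - b') = j →
              Aval m0 h w a' b' = get2 m i j := by
            intro a' b' ha' hb'
            rw [hread]; unfold Aval; rw [ha', hb', hmini, hminj]
          by_cases c3 : h - 1 - i = a ∧ w - 1 - j = b ∧
              h - 1 - i < (set2 (set2 m i (w - 1 - j) (get2 m i j)) (h - 1 - i) j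
                (get2 m i j)).length ∧
              w - 1 - j < ((set2 (set2 m i (w - 1 - j) (get2 m i j)) (h - 1 - i) j
                (get2 m i j)).getD (h - 1 - i) []).length
          · -- wrote (h-1-i, w-1-j)
            obtain ⟨ha, hb, -, -⟩ := c3
            rw [if_pos (show h - 1 - i = a ∧ w - 1 - j = b ∧
                  h - 1 - i < (set2 (set2 m i (w - 1 - j) (get2 m i j)) (h - 1 - i) j
                    (get2 m i j)).length ∧
                  w - 1 - j < ((set2 (set2 m i (w - 1 - j) (get2 m i j)) (h - 1 - i) j
                    (get2 m i j)).getD (h - 1 - i) []).length from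
                  ⟨ha, hb, by omega, by rw [e1]; omega⟩),
                if_pos (show a < h ∧ b < w ∧ (min a (h - 1 - a) < i ∨
                  (min a (h - 1 - a) = i ∧ min b (w - 1 - b) < j + 1)) by omega)]
            exact (hav a b (by omega) (by omega)).symm
          · rw [if_neg c3]
            by_cases c2 : h - 1 - i = a ∧ j = b ∧
                h - 1 - i < (set2 m i (w - 1 - j) (get2 m i j)).length ∧
                j < ((set2 m i (w - 1 - j) (get2 m i j)).getD (h - 1 - i) []).length
            · -- wrote (h-1-i, j)
              obtain ⟨ha, hb, -, -⟩ := c2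
              rw [if_pos (show h - 1 - i = a ∧ j = b ∧
                    h - 1 - i < (set2 m i (w - 1 - j) (get2 m i j)).length ∧
                    j < ((set2 m i (w - 1 - j) (get2 m i j)).getD (h - 1 - i) []).length from
                    ⟨ha, hb, by omega, by rw [e2]; omega⟩),
                  if_pos (show a < h ∧ b < w ∧ (min a (h - 1 - a) < i ∨
                    (min a (h - 1 - a) = i ∧ min b (w - 1 - b) < j + 1)) by omega)]
              exact (hav a b (by omega) (by omega)).symm
            · rw [if_neg c2]
              by_cases c1 : i = a ∧ w - 1 - j = b ∧
                  i < m.length ∧ w - 1 - j < (m.getD i []).length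
              · -- wrote (i, w-1-j)
                obtain ⟨ha, hb, -, -⟩ := c1
                rw [if_pos (show i = a ∧ w - 1 - j = b ∧
                      i < m.length ∧ w - 1 - j < (m.getD i []).length from
                      ⟨ha, hb, by omega, by rw [e3]; omega⟩),
                    if_pos (show a < h ∧ b < w ∧ (min a (h - 1 - a) < i ∨
                      (min a (h - 1 - a) = i ∧ min b (w - 1 - b) < j + 1)) by omega)]
                exact (hav a b (by omega) (by omega)).symm
              · -- untouched by the three writes
                rw [if_neg c1, hv' a b]
                by_cases hnew : a < h ∧ b < w ∧ (min a (h - 1 - a) < i ∨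
                    (min a (h - 1 - a) = i ∧ min b (w - 1 - b) < j + 1))
                · rw [if_pos hnew]
                  by_cases hold : min a (h - 1 - a) < i ∨
                      (min a (h - 1 - a) = i ∧ min b (w - 1 - b) < j)
                  · rw [if_pos (show a < h ∧ b < w ∧ (min a (h - 1 - a) < i ∨
                      (min a (h - 1 - a) = i ∧ min b (w - 1 - b) < j)) from
                      ⟨hnew.1, hnew.2.1, hold⟩)]
                  · -- newly covered at step j: the source of (a,b) is exactly (i,j),
                    -- and since its three true mirrors were written, (a,b) = (i,j) itself
                    have hsrc : min a (h - 1 - a) = i ∧ min b (w - 1 - b) = j := by omega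
                    rw [if_neg (fun hc => hold hc.2.2)]
                    have hself : a = i ∧ b = j := by
                      by_cases hai : a = i <;> by_cases hbj : b = j
                      · exact ⟨hai, hbj⟩
                      · exact absurd ⟨by omega, by omega, by omega, by rw [e3]; omega⟩ c1
                      · exact absurd ⟨by omega, by omega, by omega, by rw [e2]; omega⟩ c2
                      · exact absurd ⟨by omega, by omega, by omega, by rw [e1]; omega⟩ c3
                    obtain ⟨rfl, rfl⟩ := hself
                    unfold Aval
                    rw [hmini, hminj]
                · rw [if_neg hnew, if_neg (fun hc => hnew ⟨hc.1, hc.2.1, by omega⟩)]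
      obtain ⟨hs, hv⟩ := inner
      refine ⟨hs, fun a b => ?_⟩
      rw [hv a b]; split_ifs with h1 h2 h2 <;> first | rfl | omega
  obtain ⟨hs, hv⟩ := main
  refine ⟨hs, fun a b => ?_⟩
  rw [hv a b]
  by_cases hc : a < h ∧ b < w
  · rw [if_pos ⟨hc.1, hc.2, by omega⟩, if_pos ⟨hc.1, hc.2, trivial⟩]
  · rw [if_neg (fun hx => hc ⟨hx.1, hx.2.1⟩), if_neg (fun hx => hc ⟨hx.1, hx.2.1⟩)]

-- two matrices with the same shape as m0 and the same get2 values are equal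
theorem eq_of_char (m0 x y : List (List Int))
    (hx : ShapeEq m0 x) (hy : ShapeEq m0 y)
    (hv : ∀ a b, get2 x a b = get2 y a b) : x = y := by
  apply List.ext_getElem (hx.1.trans hy.1.symm)
  intro r hr1 hr2
  have hxr : x.getD r [] = x[r] := by simp [List.getD, List.getElem?_eq_getElem hr1]
  have hyr : y.getD r [] = y[r] := by simp [List.getD, List.getElem?_eq_getElem hr2]
  apply List.ext_getElem
  · have := (hx.2 r).trans (hy.2 r).symm
    rwa [hxr, hyr] at this
  · intro c hc1 hc2
    have := hv r c
    simp only [get2, hxr, hyr] at this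
    rwa [List.getD_eq_getElem _ _ hc1, List.getD_eq_getElem _ _ hc2] at this

-- ===== VERDICT (by name: the statement is the Claim_ definition above) =====
theorem mmirror4_spec : Claim_equal_mmirror4 := by
  intro matrix _ hpre
  unfold Spec_mmirror4
  have hA : MInv matrix matrix.length (matrix.headD []).length (fun _ _ => True)
      (mmirror4 matrix) := A_fold matrix hpre _ _ rfl rfl
  have hB : MInv matrix matrix.length (matrix.headD []).length (fun _ _ => True)
      (mmirror4_alt matrix) := B_fold matrix hpre _ _ rfl rfl
  exact eq_of_char matrix _ _ hA.1 hB.1 (fun a b => by rw [hA.2 a b, hB.2 a b])
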